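-- pv_equiv track=rewrite | github.com/Andrewdt97/cs344 | homework01/workingFile2.py | schedule_constraint
-- ===== SOURCE A (Python) =====
-- def schedule_constraint(varA, domA, varB, domB, recurse=0):
--     if varA == varB and domA == domB:
--         return False
--
--     # Parse strings into arrays
--     # [0] : Prof, [1] : Time, [2] : Room
--     domAList = domA.split(',')
--     domBList = domB.split(',')
--
--     # Professor cannot teach two classes at the same time
--     if domAList[0] == domBList[0] and domAList[1] == domBList[1]:
--         return False
--
--     # A room cannot be double occupied
--     if domAList[2] == domBList[2] and domAList[1] == domBList[1]:
--         return False
--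
--     # Specific constraints
--     if varA == 'cs108' and domAList[0] != 'DS':
--         return False
--
--     if varA == 'cs112' and domAList[0] != 'JA':
--         return False
--
--     if recurse == 0:
--         return schedule_constraint(varB, domB, varA, domA, 1)
--
--     return True
-- ===== SOURCE B (Python) =====
-- def schedule_constraint(varA, domA, varB, domB, recurse=0):
--     if varA == varB and domA == domB:
--         return False
--     a = domA.split(',')
--     b = domB.split(',')
--     # professor or room double-booked at the same time
--     if (a[0] == b[0] or a[2] == b[2]) and a[1] == b[1]:
--         return False
--     if not prof_ok(varA, a[0]):
--         return False
--     if recurse == 0 and not prof_ok(varB, b[0]):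
--         return False
--     return True
--
--
-- def prof_ok(var, prof):
--     return (var != 'cs108' or prof == 'DS') and (var != 'cs112' or prof == 'JA')
-- ===== Notes on version B (the rewrite author's own statement) =====
-- stated objective: simpler
-- what changed: Replaced A's self-recursion (re-running the equality and double-booking checks on the swapped arguments) with a flat sequence: the two symmetric double-booking checks merged into one condition by distributivity, and a prof_ok helper applied to varA and, when recurse==0, also to varB.
import Mathlib
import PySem

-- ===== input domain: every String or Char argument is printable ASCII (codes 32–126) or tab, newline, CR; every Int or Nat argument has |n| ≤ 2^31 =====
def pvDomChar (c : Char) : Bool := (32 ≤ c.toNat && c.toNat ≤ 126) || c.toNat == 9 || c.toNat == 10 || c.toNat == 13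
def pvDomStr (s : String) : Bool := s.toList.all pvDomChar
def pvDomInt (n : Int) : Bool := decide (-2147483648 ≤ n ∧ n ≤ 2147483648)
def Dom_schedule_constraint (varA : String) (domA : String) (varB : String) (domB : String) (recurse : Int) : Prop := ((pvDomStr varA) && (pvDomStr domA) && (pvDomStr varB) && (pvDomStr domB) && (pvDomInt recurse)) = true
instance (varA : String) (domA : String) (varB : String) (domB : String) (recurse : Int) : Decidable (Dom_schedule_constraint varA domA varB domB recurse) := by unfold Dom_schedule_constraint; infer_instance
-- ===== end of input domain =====

-- B replaces A's self-recursion by a flat sequence of checks (simpler); return values agree wherever A returns.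

-- ===== PORT A =====
-- pyGetD _ i "" stands for the list indexing domAList[i]; the out-of-range case (IndexError) is excluded by Pre_.
def schedule_constraint (varA : String) (domA : String) (varB : String) (domB : String) (recurse : Int) : Bool :=
  if varA == varB && domA == domB then false
  else
    let domAList := (PySem.Str.split? domA ",").getD []
    let domBList := (PySem.Str.split? domB ",").getD []
    if PySem.List.pyGetD domAList 0 "" == PySem.List.pyGetD domBList 0 ""
        && PySem.List.pyGetD domAList 1 "" == PySem.List.pyGetD domBList 1 "" then false
    else if PySem.List.pyGetD domAList 2 "" == PySem.List.pyGetD domBList 2 ""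
        && PySem.List.pyGetD domAList 1 "" == PySem.List.pyGetD domBList 1 "" then false
    else if varA == "cs108" && PySem.List.pyGetD domAList 0 "" != "DS" then false
    else if varA == "cs112" && PySem.List.pyGetD domAList 0 "" != "JA" then false
    else if recurse == 0 then schedule_constraint varB domB varA domA 1
    else true
termination_by ((if recurse == 0 then 1 else 0) : Nat)
decreasing_by simp_all

-- ===== PORT B =====
def prof_ok (var : String) (prof : String) : Bool :=
  (var != "cs108" || prof == "DS") && (var != "cs112" || prof == "JA")

def schedule_constraint_alt (varA : String) (domA : String) (varB : String) (domB : String) (recurse : Int) : Bool :=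
  if varA == varB && domA == domB then false
  else
    let a := (PySem.Str.split? domA ",").getD []
    let b := (PySem.Str.split? domB ",").getD []
    if (PySem.List.pyGetD a 0 "" == PySem.List.pyGetD b 0 ""
          || PySem.List.pyGetD a 2 "" == PySem.List.pyGetD b 2 "")
        && PySem.List.pyGetD a 1 "" == PySem.List.pyGetD b 1 "" then false
    else if !prof_ok varA (PySem.List.pyGetD a 0 "") then false
    else if recurse == 0 && !prof_ok varB (PySem.List.pyGetD b 0 "") then false
    else true

-- ===== PRECONDITION & SPEC =====
-- Pre_ excludes exactly the inputs on which Python A raises IndexError: a dom string with too few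
-- comma-separated fields whose missing field A actually indexes (short-circuiting taken into account).
def Pre_schedule_constraint (varA : String) (domA : String) (varB : String) (domB : String) (recurse : Int) : Prop :=
  (varA = varB ∧ domA = domB) ∨
  (3 ≤ ((PySem.Str.split? domA ",").getD []).length ∧ 3 ≤ ((PySem.Str.split? domB ",").getD []).length) ∨
  (2 ≤ ((PySem.Str.split? domA ",").getD []).length ∧ 2 ≤ ((PySem.Str.split? domB ",").getD []).length ∧
    PySem.List.pyGetD ((PySem.Str.split? domA ",").getD []) 0 "" = PySem.List.pyGetD ((PySem.Str.split? domB ",").getD []) 0 "" ∧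
    PySem.List.pyGetD ((PySem.Str.split? domA ",").getD []) 1 "" = PySem.List.pyGetD ((PySem.Str.split? domB ",").getD []) 1 "")
instance (varA : String) (domA : String) (varB : String) (domB : String) (recurse : Int) : Decidable (Pre_schedule_constraint varA domA varB domB recurse) := by unfold Pre_schedule_constraint; infer_instance

def pvWitness_schedule_constraint : String × String × String × String × Int :=
  ("cs108", "DS,mwf900,nh253", "cs112", "JA,mwf1030,sb382", 0)

def Spec_schedule_constraint (varA : String) (domA : String) (varB : String) (domB : String) (recurse : Int) (out : Bool) : Prop := out = schedule_constraint_alt varA domA varB domB recurse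
instance (varA : String) (domA : String) (varB : String) (domB : String) (recurse : Int) (out : Bool) : Decidable (Spec_schedule_constraint varA domA varB domB recurse out) := by unfold Spec_schedule_constraint; infer_instance

-- ===== CLAIM (what is proved, stated in full; the proofs are below) =====
def Claim_equal_schedule_constraint : Prop := ∀ (varA : String) (domA : String) (varB : String) (domB : String) (recurse : Int), Dom_schedule_constraint varA domA varB domB recurse → Pre_schedule_constraint varA domA varB domB recurse → Spec_schedule_constraint varA domA varB domB recurse (schedule_constraint varA domA varB domB recurse)

-- ===== LEMMAS AND PROOFS =====
-- The two ports agree on every input (the defaulted indexing makes both total; at the Python level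
-- the programs differ only where A raises IndexError, which Pre_ excludes).
-- sc_key: the propositional skeleton of the equivalence, over opaque Booleans (t1&&t2 the trivial
-- guard, c0/c1/c2 the field comparisons, p/q/s/r the specific-constraint atoms; primed = the
-- swapped comparisons of A's recursive call, w = the unreachable third-level call).
theorem sc_key (t1 t2 c0 c1 c2 p8 q8 p12 q12 s8 r8 s12 r12 : Bool) (r : Int)
    (t1' t2' c0' c1' c2' : Bool) (w : Bool)
    (h1 : t1' = t1) (h2 : t2' = t2) (h3 : c0' = c0) (h4 : c1' = c1) (h5 : c2' = c2) :
  (if t1 && t2 then false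
   else if c0 && c1 then false
   else if c2 && c1 then false
   else if p8 && !q8 then false
   else if p12 && !q12 then false
   else if r == 0 then
     (if t1' && t2' then false
      else if c0' && c1' then false
      else if c2' && c1' then false
      else if s8 && !r8 then false
      else if s12 && !r12 then false
      else if (1:Int) == 0 then w else true)
   else true)
  = (if t1 && t2 then false
     else if (c0 || c2) && c1 then false
     else if !((!p8 || q8) && (!p12 || q12)) then false
     else if r == 0 && !((!s8 || r8) && (!s12 || r12)) then false
     else true) := by
  rw [h1, h2, h3, h4, h5]
  clear h1 h2 h3 h4 h5 t1' t2' c0' c1' c2'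
  cases hE : ((r == 0) : Bool) <;> simp only [hE, Bool.false_eq_true, if_false, Bool.false_and, Bool.true_and] <;>
    revert t1 t2 c0 c1 c2 p8 q8 p12 q12 s8 r8 s12 r12 w <;> decide

theorem ports_eq (varA domA varB domB : String) (recurse : Int) :
    schedule_constraint varA domA varB domB recurse = schedule_constraint_alt varA domA varB domB recurse := by
  rw [schedule_constraint.eq_def, schedule_constraint.eq_def]
  simp only [schedule_constraint_alt, prof_ok, bne]
  exact sc_key _ _ _ _ _ _ _ _ _ _ _ _ _ recurse _ _ _ _ _ _
    Bool.beq_comm Bool.beq_comm Bool.beq_comm Bool.beq_comm Bool.beq_comm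

-- ===== VERDICT (by name: the statement is the Claim_ definition above) =====
theorem schedule_constraint_spec : Claim_equal_schedule_constraint := by
  intro varA domA varB domB recurse _ _
  unfold Spec_schedule_constraint
  exact ports_eq varA domA varB domB recurse
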